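-- pv_equiv track=rewrite | github.com/yashvini-chirri/EvalMate-AI-Evaluation | backend/app/services/evaluation_validator.py | _find_evaluation_result
-- ===== SOURCE A (Python) =====
-- from typing import Dict, List, Any, Tuple, Optional
--
-- def _find_evaluation_result(
--
--     evaluation_results: List[Dict[str, Any]],
--     question_id: int,
--     question_id_str: str
-- ) -> Optional[Dict[str, Any]]:
--     """Find evaluation result for given question ID"""
--
--     # Try exact question_id match first
--     for result in evaluation_results:
--         if result.get('question_id') == question_id:
--             return result
--
--     # Try string key match
--     for result in evaluation_results:
--         if str(result.get('question_id')) == question_id_str: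
--             return result
--
--     return None
-- ===== SOURCE B (Python) =====
-- from typing import Dict, List, Any, Optional
--
-- def _find_evaluation_result(
--     evaluation_results: List[Dict[str, Any]],
--     question_id: int,
--     question_id_str: str
-- ) -> Optional[Dict[str, Any]]:
--     """Single pass: return the first exact int match immediately; remember the
--     first string-representation match as a fallback returned only after the loop."""
--     fallback = None
--     for result in evaluation_results:
--         qid = result.get('question_id')
--         if qid == question_id:
--             return result
--         if fallback is None and str(qid) == question_id_str:
--             fallback = result
--     return fallback
-- ===== Notes on version B (the rewrite author's own statement) =====
-- stated objective: alternative
-- what changed: Replaces A's two full passes over evaluation_results with one pass that returns the first exact int match immediately and records the first string-representation match as a fallback returned after the loop.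
import Mathlib
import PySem

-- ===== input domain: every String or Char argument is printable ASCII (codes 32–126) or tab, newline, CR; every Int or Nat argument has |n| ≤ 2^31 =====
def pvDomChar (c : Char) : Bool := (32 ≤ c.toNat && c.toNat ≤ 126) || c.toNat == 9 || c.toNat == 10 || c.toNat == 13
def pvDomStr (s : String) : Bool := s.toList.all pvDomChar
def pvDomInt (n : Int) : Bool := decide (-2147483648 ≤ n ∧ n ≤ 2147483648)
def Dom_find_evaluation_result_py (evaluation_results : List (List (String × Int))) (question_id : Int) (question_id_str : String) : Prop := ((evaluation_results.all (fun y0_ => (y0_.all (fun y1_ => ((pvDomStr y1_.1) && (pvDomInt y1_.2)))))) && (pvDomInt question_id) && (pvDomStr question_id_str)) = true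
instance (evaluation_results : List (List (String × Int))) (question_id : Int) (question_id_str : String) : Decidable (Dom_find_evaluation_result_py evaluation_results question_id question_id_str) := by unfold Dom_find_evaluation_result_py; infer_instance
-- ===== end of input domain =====

-- ===== PORT A =====
-- B changes A's two full passes into one pass with a first-string-match fallback (same cost, single traversal).
-- dict lookup on a List (String × Int) association list: first match (exact for Python dict.get)
def pvGetQ (r : List (String × Int)) : Option Int :=
  (r.find? (fun p => p.1 == "question_id")).map Prod.snd

-- str(result.get('question_id')): str(None) = "None", str(int) via PySem.Int.toStr
def pvStrQ (r : List (String × Int)) : String :=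
  match pvGetQ r with
  | some v => PySem.Int.toStr v
  | none => "None"

def find_evaluation_result_py (evaluation_results : List (List (String × Int))) (question_id : Int) (question_id_str : String) : Option (List (String × Int)) :=
  match evaluation_results.find? (fun r => pvGetQ r == some question_id) with
  | some r => some r
  | none =>
    match evaluation_results.find? (fun r => pvStrQ r == question_id_str) with
    | some r => some r
    | none => none

-- ===== PORT B =====
def pvGoB (question_id : Int) (question_id_str : String) :
    List (List (String × Int)) → Option (List (String × Int)) → Option (List (String × Int))
  | [], fallback => fallback
  | r :: rs, fallback =>
    let qid := pvGetQ r
    if qid == some question_id then some r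
    else
      pvGoB question_id question_id_str rs
        (if fallback.isNone && ((match qid with | some v => PySem.Int.toStr v | none => "None") == question_id_str)
         then some r else fallback)

def find_evaluation_result_py_alt (evaluation_results : List (List (String × Int))) (question_id : Int) (question_id_str : String) : Option (List (String × Int)) :=
  pvGoB question_id question_id_str evaluation_results none

-- ===== PRECONDITION & SPEC =====
def Spec_find_evaluation_result_py (evaluation_results : List (List (String × Int))) (question_id : Int) (question_id_str : String) (out : Option (List (String × Int))) : Prop := out = find_evaluation_result_py_alt evaluation_results question_id question_id_str
instance (evaluation_results : List (List (String × Int))) (question_id : Int) (question_id_str : String) (out : Option (List (String × Int))) : Decidable (Spec_find_evaluation_result_py evaluation_results question_id question_id_str out) := by unfold Spec_find_evaluation_result_py; infer_instance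

-- ===== CLAIM (what is proved, stated in full; the proofs are below) =====
def Claim_equal_find_evaluation_result_py : Prop := ∀ (evaluation_results : List (List (String × Int))) (question_id : Int) (question_id_str : String), Dom_find_evaluation_result_py evaluation_results question_id question_id_str → Spec_find_evaluation_result_py evaluation_results question_id question_id_str (find_evaluation_result_py evaluation_results question_id question_id_str)

-- ===== LEMMAS AND PROOFS =====
theorem pvGoB_eq (qi : Int) (qs : String) (l : List (List (String × Int))) (fb : Option (List (String × Int))) :
    pvGoB qi qs l fb =
      ((l.find? (fun r => pvGetQ r == some qi)).or
        (fb.or (l.find? (fun r => pvStrQ r == qs)))) := by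
  induction l generalizing fb with
  | nil => cases fb <;> simp [pvGoB]
  | cons r rs ih =>
    simp only [pvGoB, List.find?]
    by_cases h : (pvGetQ r == some qi) = true
    · simp [h]
    · simp only [h, if_neg, Bool.false_eq_true, not_false_iff, ih]
      congr 1
      cases fb with
      | some v => simp [Option.or]
      | none =>
        by_cases hs : (pvStrQ r == qs) = true
        · rw [if_pos]
          · have hs' : (pvStrQ r == qs) = true := by simpa [pvStrQ] using hs
            simp [Option.or, hs']
          · simpa [pvStrQ] using hs
        · rw [if_neg]
          · simp [hs]
          · simpa [pvStrQ] using hs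

-- ===== VERDICT (by name: the statement is the Claim_ definition above) =====
theorem find_evaluation_result_py_spec : Claim_equal_find_evaluation_result_py := by
  intro l qi qs _
  unfold Spec_find_evaluation_result_py find_evaluation_result_py find_evaluation_result_py_alt
  rw [pvGoB_eq]
  cases h1 : l.find? (fun r => pvGetQ r == some qi) <;>
    cases h2 : l.find? (fun r => pvStrQ r == qs) <;> simp [Option.or]
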